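-- pv_equiv track=rewrite | github.com/michelbierlaire/biogeme | src/biogeme/tools.py | generate_unique_ids
-- ===== SOURCE A (Python) =====
-- from collections import defaultdict
--
-- def generate_unique_ids(list_of_ids):
--     """If there are duplicates in the list, a new list is generated
--     where there are renamed to obtain a list with unique IDs.
--
--     :param list_of_ids: list of ids
--     :type list_of_ids: list[str]
--
--     :return: a dict that maps the unique names with the original name
--     """
--     counts = defaultdict(int)
--     for the_id in list_of_ids:
--         counts[the_id] += 1
--
--     results = {}
--     for name, count in counts.items():
--         if count == 1:
--             results[name] = name
--         else:
--             substitutes = [f'{name}_{i}' for i in range(count)]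
--             for new_name in substitutes:
--                 results[new_name] = name
--     return results
-- ===== SOURCE B (Python) =====
-- def generate_unique_ids(list_of_ids):
--     """Partition loop: repeatedly take the first remaining id, count its
--     occurrences, emit its block of result names, and drop all its occurrences
--     from the remaining list."""
--     results = {}
--     remaining = list(list_of_ids)
--     while remaining:
--         name = remaining[0]
--         count = remaining.count(name)
--         if count == 1:
--             results[name] = name
--         else:
--             for i in range(count):
--                 results[f'{name}_{i}'] = name
--         remaining = [x for x in remaining if x != name]
--     return results
-- ===== Notes on version B (the rewrite author's own statement) =====
-- stated objective: alternative
-- what changed: B replaces A's two staged passes (build a count dict, then expand its items) by a single partition loop: repeatedly peel the first remaining id, count its occurrences, emit that id's block of result names, and drop all its occurrences from the remaining list.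
import Mathlib
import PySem

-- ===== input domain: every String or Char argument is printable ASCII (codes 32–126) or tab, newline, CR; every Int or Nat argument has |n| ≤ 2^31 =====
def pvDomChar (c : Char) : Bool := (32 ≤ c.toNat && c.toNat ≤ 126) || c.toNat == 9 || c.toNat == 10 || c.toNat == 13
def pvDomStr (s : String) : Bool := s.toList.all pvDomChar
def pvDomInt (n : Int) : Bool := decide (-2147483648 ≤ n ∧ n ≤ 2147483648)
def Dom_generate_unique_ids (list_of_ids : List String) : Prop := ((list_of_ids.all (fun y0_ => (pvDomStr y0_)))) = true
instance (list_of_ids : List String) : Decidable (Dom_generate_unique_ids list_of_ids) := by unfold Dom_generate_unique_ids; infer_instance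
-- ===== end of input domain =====

-- B replaces A's count-dict-then-expand by a partition loop: repeatedly peel the first
-- remaining id, count it, emit its block, and drop its occurrences (objective: alternative).


-- ===== PORT A =====
def generate_unique_ids (list_of_ids : List String) : List (String × String) :=
  let counts : PySem.Dict String Int :=
    list_of_ids.foldl (fun d the_id => d.modify the_id 0 (· + 1)) PySem.Dict.empty
  let results : PySem.Dict String String :=
    counts.items.foldl (fun r nc =>
      if nc.2 == 1 then r.insert nc.1 nc.1
      else
        let substitutes := (PySem.List.pyRange 0 nc.2).map
          (fun i => nc.1 ++ "_" ++ PySem.Int.toStr i)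
        substitutes.foldl (fun r new_name => r.insert new_name nc.1) r)
      PySem.Dict.empty
  results.items

-- ===== PORT B =====
-- the 'while remaining:' loop of Source B, with 'results' as accumulator
def generate_unique_ids_altLoop (remaining : List String)
    (results : PySem.Dict String String) : PySem.Dict String String :=
  match remaining with
  | [] => results
  | name :: rest =>
    let count : Int := (PySem.List.count (name :: rest) name : Int)
    let results' : PySem.Dict String String :=
      if count == 1 then results.insert name name
      else (PySem.List.pyRange 0 count).foldl
        (fun r i => r.insert (name ++ "_" ++ PySem.Int.toStr i) name) results
    generate_unique_ids_altLoop ((name :: rest).filter (fun x => x != name)) results'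
termination_by remaining.length
decreasing_by
  calc ((name :: rest).filter (fun x => x != name)).length
      = (rest.filter (fun x => x != name)).length := by simp
    _ ≤ rest.length := List.length_filter_le _ _
    _ < rest.length + 1 := Nat.lt_succ_self _

def generate_unique_ids_alt (list_of_ids : List String) : List (String × String) :=
  (generate_unique_ids_altLoop list_of_ids PySem.Dict.empty).items

-- ===== PRECONDITION & SPEC =====
def Spec_generate_unique_ids (list_of_ids : List String) (out : List (String × String)) : Prop := out = generate_unique_ids_alt list_of_ids
instance (list_of_ids : List String) (out : List (String × String)) : Decidable (Spec_generate_unique_ids list_of_ids out) := by unfold Spec_generate_unique_ids; infer_instance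

-- ===== CLAIM (what is proved, stated in full; the proofs are below) =====
def Claim_equal_generate_unique_ids : Prop := ∀ (list_of_ids : List String), Dom_generate_unique_ids list_of_ids → Spec_generate_unique_ids list_of_ids (generate_unique_ids list_of_ids)

-- ===== LEMMAS AND PROOFS =====

-- Set.ofList commutes with filter (first-occurrence dedup of a filtered list).
theorem filter_ofList {α : Type} [BEq α] [LawfulBEq α] (p : α → Bool) (xs : List α) :
    (PySem.Set.ofList xs).filter p = PySem.Set.ofList (xs.filter p) := by
  induction xs with
  | nil => rfl
  | cons x xs ih =>
    rw [PySem.Set.ofList_cons, List.filter_cons]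
    by_cases hp : p x = true
    · rw [show List.filter p (x :: xs) = x :: List.filter p xs from by simp [hp],
        PySem.Set.ofList_cons]
      unfold PySem.Set.discard
      rw [List.filter_comm, ih, if_pos hp]
    · rw [show List.filter p (x :: xs) = List.filter p xs from by simp [hp]]
      unfold PySem.Set.discard
      rw [List.filter_comm, ih, if_neg hp]
      rw [List.filter_eq_self.mpr]
      intro a ha
      have hax : a ∈ xs.filter p := (PySem.Set.mem_ofList _ _).mp ha
      simp only [List.mem_filter] at hax
      have : a ≠ x := by rintro rfl; exact hp hax.2
      simp [this]

-- Decomposition of Counter(x :: xs).items: head element, then the counter of the rest stripped of x.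
theorem counter_cons_items (x : String) (xs : List String) :
    (PySem.Dict.counter (x :: xs)).items
      = (x, ((x :: xs).count x : Int)) ::
        (PySem.Dict.counter (xs.filter (fun y => y != x))).items := by
  rw [PySem.Dict.items_counter, PySem.Dict.items_counter, PySem.Set.ofList_cons, List.map_cons]
  congr 1
  have hd : (PySem.Set.ofList xs).discard x = PySem.Set.ofList (xs.filter (fun y => y != x)) := by
    unfold PySem.Set.discard
    rw [filter_ofList]
    congr 1
  rw [hd]
  apply List.map_congr_left
  intro k hk
  have hk' : k ∈ xs.filter (fun y => y != x) := (PySem.Set.mem_ofList _ _).mp hk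
  simp only [List.mem_filter, bne_iff_ne, ne_eq] at hk'
  have hne : k ≠ x := hk'.2
  congr 1
  rw [List.count_filter (by simpa using hne)]
  simp [List.count_cons]
  exact Ne.symm hne

-- A's per-item loop, folded over Counter(xs).items from d, is B's partition loop on xs from d.
theorem main_loop : ∀ (n : Nat) (xs : List String), xs.length ≤ n →
    ∀ d : PySem.Dict String String,
      ((PySem.Dict.counter xs).items.foldl (fun r nc =>
        if nc.2 == 1 then r.insert nc.1 nc.1
        else ((PySem.List.pyRange 0 nc.2).map
          (fun i => nc.1 ++ "_" ++ PySem.Int.toStr i)).foldl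
            (fun r new_name => r.insert new_name nc.1) r) d)
      = generate_unique_ids_altLoop xs d := by
  intro n
  induction n with
  | zero =>
    intro xs hlen d
    have : xs = [] := List.eq_nil_of_length_eq_zero (Nat.le_zero.mp hlen)
    subst this
    rw [generate_unique_ids_altLoop]
    rfl
  | succ n ih =>
    intro xs hlen d
    match xs with
    | [] => rw [generate_unique_ids_altLoop]; rfl
    | name :: rest =>
      rw [counter_cons_items, List.foldl_cons, generate_unique_ids_altLoop]
      simp only [PySem.List.count]
      have hfilter : (name :: rest).filter (fun x => x != name)
          = rest.filter (fun y => y != name) := by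
        simp
      rw [hfilter]
      rw [ih (rest.filter (fun y => y != name))
        (le_trans (List.length_filter_le _ _) (Nat.le_of_succ_le_succ hlen))]
      congr 1
      by_cases h1 : ((((name :: rest).count name : Int)) == 1) = true
      · simp only [h1, if_pos]
      · simp only [h1, if_neg, Bool.false_eq_true, not_false_iff]
        rw [List.foldl_map]

-- The two ports agree on every input.
theorem generate_unique_ids_eq_alt (xs : List String) :
    generate_unique_ids xs = generate_unique_ids_alt xs := by
  unfold generate_unique_ids generate_unique_ids_alt
  dsimp only
  rw [← PySem.Dict.counter_eq_foldl]
  rw [main_loop xs.length xs le_rfl PySem.Dict.empty]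

-- ===== VERDICT (by name: the statement is the Claim_ definition above) =====
theorem generate_unique_ids_spec : Claim_equal_generate_unique_ids := by
  intro list_of_ids _
  exact generate_unique_ids_eq_alt list_of_ids
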